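-- pv_equiv track=rewrite | github.com/koustubh25/scratchpad | app/modernize_demo/adapters/source/coldfusion.py | _collect_prefixed_tokens
-- ===== SOURCE A (Python) =====
-- def _collect_prefixed_tokens(text: str, prefixes: list[str]) -> set[str]:
--     token = []
--     results: set[str] = set()
--     for char in text:
--         if char.isalnum() or char in "._":
--             token.append(char)
--         else:
--             _commit_token("".join(token), prefixes, results)
--             token = []
--     _commit_token("".join(token), prefixes, results)
--     return results
--
-- def _commit_token(token: str, prefixes: list[str], results: set[str]) -> None:
--     if any(token.startswith(prefix) for prefix in prefixes):
--         results.add(token)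
-- ===== SOURCE B (Python) =====
-- def _collect_prefixed_tokens(text: str, prefixes: list[str]) -> set[str]:
--     cleaned = "".join(c if c.isalnum() or c in "._" else "\n" for c in text)
--     return {t for t in cleaned.split("\n") if any(t.startswith(p) for p in prefixes)}
-- ===== Notes on version B (the rewrite author's own statement) =====
-- stated objective: idiomatic
-- what changed: Replaces A's stateful character loop (token accumulator plus commit-on-separator helper mutating a result set) with a pipeline: map each non-token character to a newline, split the string once, and build the set from a filtering comprehension.
import Mathlib
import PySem

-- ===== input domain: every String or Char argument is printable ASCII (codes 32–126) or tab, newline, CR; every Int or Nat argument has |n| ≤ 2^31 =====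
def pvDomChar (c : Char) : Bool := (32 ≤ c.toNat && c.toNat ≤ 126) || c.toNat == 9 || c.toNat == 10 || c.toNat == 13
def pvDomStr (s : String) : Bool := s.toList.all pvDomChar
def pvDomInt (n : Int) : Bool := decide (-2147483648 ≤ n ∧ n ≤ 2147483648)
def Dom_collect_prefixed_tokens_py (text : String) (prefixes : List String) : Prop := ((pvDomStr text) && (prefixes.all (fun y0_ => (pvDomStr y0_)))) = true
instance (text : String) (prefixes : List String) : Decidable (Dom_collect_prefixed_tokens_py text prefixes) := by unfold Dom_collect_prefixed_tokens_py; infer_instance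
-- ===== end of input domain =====

-- B replaces A's stateful accumulator loop with a map-to-separator / split / filter pipeline (objective: idiomatic; same cost).

-- shared by both ports: the tokenizing predicate `char.isalnum() or char in "._"`
-- (both Pythons spell this condition identically; 'char in "._"' on a single char = membership in its chars)
def pvIsTokenChar (c : Char) : Bool := PySem.Chars.isalnum c || "._".toList.contains c

-- ===== PORT A =====
def pvCommitToken (token : String) (prefixes : List String) (results : PySem.Set String) : PySem.Set String :=
  if prefixes.any (fun p => PySem.Str.startswith token p) then results.add token else results

def collect_prefixed_tokens_py (text : String) (prefixes : List String) : List String :=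
  let st := text.toList.foldl
    (fun (st : List Char × PySem.Set String) char =>
      if pvIsTokenChar char then (st.1 ++ [char], st.2)
      else ([], pvCommitToken (String.ofList st.1) prefixes st.2))
    ([], PySem.Set.empty)
  pvCommitToken (String.ofList st.1) prefixes st.2

-- ===== PORT B =====
def collect_prefixed_tokens_py_alt (text : String) (prefixes : List String) : List String :=
  let cleaned := String.ofList (text.toList.map (fun c => if pvIsTokenChar c then c else '\n'))
  -- str.split(sep) with sep = "\n" ≠ "" never raises, so the `none` branch of split? is unreachable
  let parts := (PySem.Str.split? cleaned "\n").getD []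
  PySem.Set.ofList (parts.filter (fun t => prefixes.any (fun p => PySem.Str.startswith t p)))

-- ===== PRECONDITION & SPEC =====
def Spec_collect_prefixed_tokens_py (text : String) (prefixes : List String) (out : List String) : Prop := out = collect_prefixed_tokens_py_alt text prefixes
instance (text : String) (prefixes : List String) (out : List String) : Decidable (Spec_collect_prefixed_tokens_py text prefixes out) := by unfold Spec_collect_prefixed_tokens_py; infer_instance

-- ===== CLAIM (what is proved, stated in full; the proofs are below) =====
def Claim_equal_collect_prefixed_tokens_py : Prop := ∀ (text : String) (prefixes : List String), Dom_collect_prefixed_tokens_py text prefixes → Spec_collect_prefixed_tokens_py text prefixes (collect_prefixed_tokens_py text prefixes)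

-- ===== LEMMAS AND PROOFS =====

-- the sequence of tokens A commits (in commit order) while scanning `cs` with pending token `tok`
def pvCommits (tok : List Char) : List Char → List (List Char)
  | [] => [tok]
  | c :: cs => if pvIsTokenChar c then pvCommits (tok ++ [c]) cs else tok :: pvCommits [] cs

-- splitting a char list at '\n' (what Chars.splitOn computes for sep = ['\n'])
def pvNlSplit (tok : List Char) : List Char → List (List Char)
  | [] => [tok]
  | c :: cs => if c = '\n' then tok :: pvNlSplit [] cs else pvNlSplit (tok ++ [c]) cs

lemma pv_go_step (fuel : Nat) (c : Char) (rest cur : List Char) (acc : List (List Char)) :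
    PySem.Chars.splitOn.go ['\n'] (fuel+1) (c :: rest) cur acc =
      if c = '\n' then PySem.Chars.splitOn.go ['\n'] fuel rest [] (cur.reverse :: acc)
      else PySem.Chars.splitOn.go ['\n'] fuel rest (c :: cur) acc := by
  rw [PySem.Chars.splitOn.go]
  by_cases h : c = '\n'
  · subst h; simp [List.isPrefixOf]
  · simp [List.isPrefixOf, h, Ne.symm h]

lemma pv_go_eq (fuel : Nat) (l cur : List Char) (acc : List (List Char)) (h : l.length ≤ fuel) :
    PySem.Chars.splitOn.go ['\n'] fuel l cur acc = acc.reverse ++ pvNlSplit cur.reverse l := by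
  induction fuel generalizing l cur acc with
  | zero =>
    have : l = [] := List.eq_nil_of_length_eq_zero (Nat.le_zero.mp h)
    subst this
    simp [PySem.Chars.splitOn.go, pvNlSplit]
  | succ fuel ih =>
    cases l with
    | nil => simp [PySem.Chars.splitOn.go, pvNlSplit]
    | cons c rest =>
      rw [pv_go_step]
      by_cases hc : c = '\n'
      · rw [if_pos hc, ih rest [] _ (by simpa using Nat.le_of_succ_le_succ h)]
        simp [pvNlSplit, hc]
      · rw [if_neg hc, ih rest (c :: cur) acc (by simpa using Nat.le_of_succ_le_succ h)]
        simp [pvNlSplit, hc]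

lemma pv_splitOn_eq (l : List Char) : PySem.Chars.splitOn l ['\n'] = pvNlSplit [] l := by
  have := pv_go_eq (l.length + 1) l [] [] (by omega)
  simpa [PySem.Chars.splitOn] using this

lemma pv_token_ne_nl (c : Char) (h : pvIsTokenChar c = true) : c ≠ '\n' := by
  intro hc; subst hc; exact absurd h (by decide)

lemma pv_nlSplit_map (cs tok : List Char) :
    pvNlSplit tok (cs.map (fun c => if pvIsTokenChar c then c else '\n')) = pvCommits tok cs := by
  induction cs generalizing tok with
  | nil => simp [pvNlSplit, pvCommits]
  | cons c cs ih =>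
    by_cases h : pvIsTokenChar c
    · simp only [List.map_cons, if_pos h, pvNlSplit, pvCommits,
        if_neg (pv_token_ne_nl c h)]
      exact ih (tok ++ [c])
    · simp only [List.map_cons, if_neg h, pvNlSplit, pvCommits]
      rw [if_pos trivial, ih []]

lemma pv_fold_eq (prefixes : List String) (cs tok : List Char) (res : PySem.Set String) :
    (let st := cs.foldl
        (fun (st : List Char × PySem.Set String) char =>
          if pvIsTokenChar char then (st.1 ++ [char], st.2)
          else ([], pvCommitToken (String.ofList st.1) prefixes st.2))
        (tok, res)
     pvCommitToken (String.ofList st.1) prefixes st.2)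
    = (pvCommits tok cs).foldl (fun r t => pvCommitToken (String.ofList t) prefixes r) res := by
  induction cs generalizing tok res with
  | nil => simp [pvCommits]
  | cons c cs ih =>
    by_cases h : pvIsTokenChar c
    · simpa [pvCommits, h] using ih (tok ++ [c]) res
    · simpa [pvCommits, h] using ih [] (pvCommitToken (String.ofList tok) prefixes res)

lemma pv_filter_foldl (p : String → Bool) (l : List String) :
    PySem.Set.ofList (l.filter p)
      = l.foldl (fun r t => if p t then PySem.Set.add r t else r) PySem.Set.empty := by
  induction l using List.reverseRecOn with
  | nil => rfl
  | append_singleton l x ih =>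
    rw [List.foldl_append, List.filter_append, ← ih]
    by_cases h : p x
    · simp [h, PySem.Set.ofList_append_singleton]
    · simp [h]

lemma pv_split?_eq (cleaned : String) :
    (PySem.Str.split? cleaned "\n").getD []
      = (PySem.Chars.splitOn cleaned.toList ['\n']).map String.ofList := by
  have hmap := PySem.Str.split?_map cleaned "\n"
  have hsep : PySem.Chars.split? cleaned.toList "\n".toList
      = some (PySem.Chars.splitOn cleaned.toList "\n".toList) := by
    simp [PySem.Chars.split?]
  rw [hsep] at hmap
  cases hL : PySem.Str.split? cleaned "\n" with
  | none =>
    rw [hL] at hmap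
    simp only [Option.map_none] at hmap
    exact absurd hmap.symm (Option.some_ne_none _)
  | some L =>
    rw [hL] at hmap
    simp only [Option.map_some, Option.some.injEq] at hmap
    rw [show "\n".toList = ['\n'] from rfl] at hmap
    rw [Option.getD_some, ← hmap, List.map_map]
    simp [Function.comp_def]

-- ===== VERDICT (by name: the statement is the Claim_ definition above) =====
theorem collect_prefixed_tokens_py_spec : Claim_equal_collect_prefixed_tokens_py := by
  intro text prefixes _
  show collect_prefixed_tokens_py text prefixes = collect_prefixed_tokens_py_alt text prefixes
  unfold collect_prefixed_tokens_py collect_prefixed_tokens_py_alt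
  rw [pv_fold_eq prefixes text.toList [] PySem.Set.empty]
  show _ = PySem.Set.ofList (List.filter (fun t => prefixes.any fun p => PySem.Str.startswith t p)
      ((PySem.Str.split? (String.ofList (text.toList.map (fun c => if pvIsTokenChar c then c else '\n'))) "\n").getD []))
  rw [pv_split?_eq, String.toList_ofList, pv_splitOn_eq, pv_nlSplit_map text.toList [],
    pv_filter_foldl, List.foldl_map]
  simp [pvCommitToken]
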